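-- pv_equiv track=rewrite | github.com/patonlab/molDscript | dftdescp/opt.py | file_base
-- ===== SOURCE A (Python) =====
-- def file_base(string):
--     try:
--         int(string[-1])
--     except:
--         pass
--     else:
--         return string
--     for i in string[::-1]:
--         try:
--             int(i)
--         except:
--             pass
--         else:
--             lastidx = string.rfind(i) + 1
--
--             break
--     startidx = string.rfind('/') +1
--
--     return string[startidx:lastidx]
-- ===== SOURCE B (Python) =====
-- def file_base(string):
--     if string and string[-1].isdigit():
--         return string
--     lastidx = None
--     for idx, ch in enumerate(string):
--         if ch.isdigit():
--             lastidx = idx + 1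
--     if lastidx is None:
--         raise ValueError("no digit in %r" % string)
--     return string[string.rfind('/') + 1:lastidx]
-- ===== Notes on version B (the rewrite author's own statement) =====
-- stated objective: simpler
-- what changed: Replaces the reversed scan with try/except int() plus an rfind of the found character by a single forward enumerate pass that keeps the index after the last digit, so the digit rfind and the exception machinery disappear.
import Mathlib
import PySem

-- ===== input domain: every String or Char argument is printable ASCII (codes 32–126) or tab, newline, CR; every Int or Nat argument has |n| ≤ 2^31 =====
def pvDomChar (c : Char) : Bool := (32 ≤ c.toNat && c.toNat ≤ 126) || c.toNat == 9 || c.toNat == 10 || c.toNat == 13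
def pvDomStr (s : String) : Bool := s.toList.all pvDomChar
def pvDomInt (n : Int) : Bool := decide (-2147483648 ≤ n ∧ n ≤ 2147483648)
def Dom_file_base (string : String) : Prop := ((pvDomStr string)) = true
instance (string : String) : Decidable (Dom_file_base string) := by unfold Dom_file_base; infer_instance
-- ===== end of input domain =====

-- B replaces A's reversed try/except-int() scan plus per-character rfind by one forward
-- enumerate pass keeping the index after the last digit (simpler; same O(n) cost).

-- ===== PORT A =====
-- the 'for i in string[::-1]' loop: first char i with int(i) succeeding
-- gives lastidx = string.rfind(i) + 1 and breaks; none = lastidx stays unbound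
def fileALoop (string : String) : List Char → Option Int
  | [] => none
  | i :: rest =>
    if (PySem.Int.ofChars? [i]).isSome then
      some (PySem.Str.rfind string (String.ofList [i]) + 1)
    else fileALoop string rest

def file_base (string : String) : String :=
  -- try: int(string[-1]) / except: pass / else: return string
  if ((PySem.Str.pyGet? string (-1)).bind fun c => PySem.Int.ofChars? [c]).isSome then
    string
  else
    -- string[::-1] = reverse (PySem.Str.slice?_none_none_neg_one)
    match fileALoop string string.toList.reverse with
    | some lastidx =>
      let startidx := PySem.Str.rfind string "/" + 1
      PySem.Str.slice string (some startidx) (some lastidx)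
    | none => ""  -- Python raises UnboundLocalError here; excluded by Pre_file_base

-- ===== PORT B =====
def file_base_alt (string : String) : String :=
  let cs := string.toList
  if (match cs.getLast? with | some c => PySem.Chars.isdigit c | none => false) then
    string
  else
    match (PySem.List.enumerate cs 0).foldl
      (fun acc p => if PySem.Chars.isdigit p.2 then some (p.1 + 1) else acc)
      (none : Option Int) with
    | some lastidx =>
      PySem.Str.slice string (some (PySem.Str.rfind string "/" + 1)) (some lastidx)
    | none => ""  -- Python B raises ValueError here; excluded by Pre_file_base

-- ===== PRECONDITION & SPEC =====
-- A binds lastidx (and so returns) exactly when the string contains a decimal digit.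
def Pre_file_base (string : String) : Prop :=
  string.toList.any PySem.Chars.isdigit = true
instance (string : String) : Decidable (Pre_file_base string) := by
  unfold Pre_file_base; infer_instance

def pvWitness_file_base : String := "dir/file12.log"

def Spec_file_base (string : String) (out : String) : Prop := out = file_base_alt string
instance (string : String) (out : String) : Decidable (Spec_file_base string out) := by
  unfold Spec_file_base; infer_instance

-- ===== CLAIM (what is proved, stated in full; the proofs are below) =====
def Claim_equal_file_base : Prop := ∀ (string : String), Dom_file_base string → Pre_file_base string → Spec_file_base string (file_base string)

-- ===== LEMMAS AND PROOFS =====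

-- On characters below code 128 (all of Dom), int(c) succeeds exactly on '0'..'9'.
lemma ofChars_isSome_eq_isdigit (c : Char) (h : c.toNat < 128) :
    (PySem.Int.ofChars? [c]).isSome = PySem.Chars.isdigit c := by
  have hall : ∀ n : Fin 128,
      (PySem.Int.ofChars? [Char.ofNat n.val]).isSome = PySem.Chars.isdigit (Char.ofNat n.val) := by
    decide
  have := hall ⟨c.toNat, h⟩
  simpa [Char.ofNat_toNat] using this

lemma domChar_lt (c : Char) (h : pvDomChar c = true) : c.toNat < 128 := by
  simp [pvDomChar] at h
  omega

lemma pyGet_neg_one (cs : List Char) : PySem.List.pyGet? cs (-1) = cs.getLast? := by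
  cases cs with
  | nil => rfl
  | cons x xs =>
    simp [PySem.List.pyGet?, PySem.List.pyIdx?, List.getLast?_eq_getElem?]

lemma singleton_isPrefixOf (c : Char) (l : List Char) :
    [c].isPrefixOf l = (l.head? == some c) := by
  cases l <;> simp [List.isPrefixOf, eq_comm]

lemma rfind_go_eq (s sub : List Char) (j n : Nat) (hj : j ≤ n)
    (hpre : sub.isPrefixOf (s.drop j) = true)
    (hmax : ∀ k, j < k → k ≤ n → sub.isPrefixOf (s.drop k) = false) :
    PySem.Chars.rfind.go s sub n = (j : Int) := by
  induction n with
  | zero =>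
    interval_cases j
    simpa [PySem.Chars.rfind.go] using hpre
  | succ m ih =>
    rcases Nat.lt_or_ge j (m + 1) with hlt | hge
    · have hm : sub.isPrefixOf (s.drop (m + 1)) = false := hmax (m + 1) hlt (le_refl _)
      simp only [PySem.Chars.rfind.go, hm]
      exact ih (by omega) (fun k hk1 hk2 => hmax k hk1 (by omega))
    · have hj' : j = m + 1 := by omega
      subst hj'
      simp [PySem.Chars.rfind.go, hpre]

lemma rfind_last_occ (u v : List Char) (c : Char) (hv : ∀ x ∈ v, x ≠ c) :
    PySem.Chars.rfind (u ++ c :: v) [c] = (u.length : Int) := by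
  unfold PySem.Chars.rfind
  refine rfind_go_eq _ _ u.length _ ?_ ?_ ?_
  · simp only [List.length_append, List.length_cons]; omega
  · rw [List.drop_left, singleton_isPrefixOf]
    simp
  · intro k hk1 hk2
    rw [singleton_isPrefixOf]
    rcases Nat.lt_or_ge k (u ++ c :: v).length with hlt | hge
    · rw [List.head?_drop]
      rw [List.getElem?_append_right (by omega)]
      have hk3 : k - u.length = (k - u.length - 1) + 1 := by omega
      rw [hk3]
      simp only [List.getElem?_cons_succ]
      cases hx : v[k - u.length - 1]? with
      | none => simp
      | some x =>
        have : x ∈ v := List.mem_of_getElem? hx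
        simp [hv x this]
    · rw [List.drop_eq_nil_of_le hge]
      simp

-- A's loop skips a non-digit prefix
lemma fileALoop_append (string : String) (w r : List Char)
    (hw : ∀ x ∈ w, (PySem.Int.ofChars? [x]).isSome = false) :
    fileALoop string (w ++ r) = fileALoop string r := by
  induction w with
  | nil => rfl
  | cons x xs ih =>
    simp only [List.cons_append, fileALoop, hw x (by simp)]
    exact ih (fun y hy => hw y (by simp [hy]))

-- B's fold ignores a digit-free tail
lemma foldB_nodigit (v : List Char) (hv : ∀ x ∈ v, PySem.Chars.isdigit x = false) :
    ∀ (s : Int) (a : Option Int), (PySem.List.enumerate v s).foldl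
      (fun acc p => if PySem.Chars.isdigit p.2 then some (p.1 + 1) else acc) a = a := by
  induction v with
  | nil => intro s a; simp [PySem.List.enumerate_nil]
  | cons x xs ih =>
    intro s a
    simp only [PySem.List.enumerate_cons, List.foldl_cons, hv x (by simp)]
    exact ih (fun y hy => hv y (by simp [hy])) _ _

-- split off the last digit
lemma exists_last_digit_split (cs : List Char) (h : cs.any PySem.Chars.isdigit = true) :
    ∃ u c v, cs = u ++ c :: v ∧ PySem.Chars.isdigit c = true ∧
      ∀ x ∈ v, PySem.Chars.isdigit x = false := by
  induction cs using List.reverseRecOn with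
  | nil => simp at h
  | append_singleton xs a ih =>
    by_cases ha : PySem.Chars.isdigit a = true
    · exact ⟨xs, a, [], by simp, ha, by simp⟩
    · have hxs : xs.any PySem.Chars.isdigit = true := by
        simp only [List.any_append, List.any_cons, List.any_nil, Bool.or_false] at h
        rcases Bool.or_eq_true_iff.mp h with h' | h'
        · exact h'
        · exact absurd h' ha
      obtain ⟨u, c, v, heq, hc, hv⟩ := ih hxs
      exact ⟨u, c, v ++ [a], by simp [heq], hc,
        fun x hx => by
          rcases List.mem_append.mp hx with hx | hx
          · exact hv x hx
          · simp at hx; subst hx; exact Bool.eq_false_iff.mpr ha⟩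

-- ===== VERDICT (by name: the statement is the Claim_ definition above) =====
theorem file_base_spec : Claim_equal_file_base := by
  intro string hdom hpre
  unfold Pre_file_base at hpre
  unfold Spec_file_base file_base file_base_alt
  have hdomc : ∀ x ∈ string.toList, x.toNat < 128 := by
    intro x hx
    refine domChar_lt x ?_
    unfold Dom_file_base pvDomStr at hdom
    exact List.all_eq_true.mp hdom x hx
  have hget : PySem.Str.pyGet? string (-1) = string.toList.getLast? := by
    simp [pyGet_neg_one]
  cases hlast : string.toList.getLast? with
  | none =>
    rw [List.getLast?_eq_none_iff.mp hlast] at hpre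
    simp at hpre
  | some c0 =>
    have hc0mem : c0 ∈ string.toList := List.mem_of_getLast? hlast
    have hof : (PySem.Int.ofChars? [c0]).isSome = PySem.Chars.isdigit c0 :=
      ofChars_isSome_eq_isdigit _ (hdomc _ hc0mem)
    by_cases hd : PySem.Chars.isdigit c0 = true
    · rw [hget, hlast]
      simp [hlast, hd]
      intro hnone
      rw [hnone, hd] at hof
      simp at hof
    · have hd' : PySem.Chars.isdigit c0 = false := Bool.eq_false_iff.mpr hd
      obtain ⟨u, c, v, heq, hc, hv⟩ := exists_last_digit_split _ hpre
      have hrev : string.toList.reverse = v.reverse ++ c :: u.reverse := by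
        rw [heq]; simp
      have hvd : ∀ x ∈ v.reverse, (PySem.Int.ofChars? [x]).isSome = false := by
        intro x hx
        have hxm : x ∈ v := List.mem_reverse.mp hx
        rw [ofChars_isSome_eq_isdigit x (hdomc x (by rw [heq]; simp [hxm]))]
        exact hv x hxm
      have hcd : (PySem.Int.ofChars? [c]).isSome = true := by
        rw [ofChars_isSome_eq_isdigit c (hdomc c (by rw [heq]; simp))]
        exact hc
      have hloop : fileALoop string string.toList.reverse =
          some (PySem.Str.rfind string (String.ofList [c]) + 1) := by
        rw [hrev, fileALoop_append string _ _ hvd]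
        simp [fileALoop, hcd]
      have hrf : PySem.Str.rfind string (String.ofList [c]) = (u.length : Int) := by
        rw [PySem.Str.rfind_eq]
        have : (String.ofList [c]).toList = [c] := by simp
        rw [this, heq]
        exact rfind_last_occ u v c (fun x hx => by
          intro hxc; subst hxc
          exact absurd hc (by simp [hv x hx]))
      have hfold : (PySem.List.enumerate string.toList 0).foldl
          (fun acc p => if PySem.Chars.isdigit p.2 then some (p.1 + 1) else acc)
          (none : Option Int)
          = some ((u.length : Int) + 1) := by
        rw [heq, PySem.List.enumerate_append, List.foldl_append,
          PySem.List.enumerate_cons, List.foldl_cons]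
        simp only [hc, if_true]
        rw [foldB_nodigit v (fun x hx => hv x hx)]
        norm_num
      simp only [hget, hlast, Option.bind_some, hof, hd', Bool.false_eq_true,
        if_false, hloop, hfold, hrf]
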